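-- pv_equiv track=rewrite | github.com/Saurabhkumar726/Coding-Practice | LeetCode/2026-04-11_minimum-distance-between-three-equal-elements-ii.py | minimumDistance
-- ===== SOURCE A (Python) =====
-- from typing import List
-- from collections import defaultdict
--
-- def minimumDistance(nums: List[int]) -> int:
--     pos = defaultdict(list)
--
--     for i, v in enumerate(nums):
--         pos[v].append(i)
--
--     ans = float('inf')
--
--     for idxs in pos.values():
--         if len(idxs) < 3:
--             continue
--
--         for i in range(len(idxs) - 2):
--             a, b, c = idxs[i], idxs[i + 1], idxs[i + 2]
--             dist = 2 * (c - a)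
--             ans = min(ans, dist)
--
--     return ans if ans != float('inf') else -1
-- ===== SOURCE B (Python) =====
-- from typing import List
--
-- def minimumDistance(nums: List[int]) -> int:
--     last = {}          # value -> at most the last two indices seen for it
--     ans = None
--     for i, v in enumerate(nums):
--         l = last.get(v, [])
--         if len(l) == 2:
--             d = 2 * (i - l[0])
--             if ans is None or d < ans:
--                 ans = d
--         t = l + [i]
--         if len(t) > 2:
--             t = t[1:]
--         last[v] = t
--     return -1 if ans is None else ans
-- ===== Notes on version B (the rewrite author's own statement) =====
-- stated objective: alternative
-- what changed: B replaces A's two-phase group-all-indices-per-value-then-rescan-each-list with a single pass over enumerate(nums) that keeps only the last two indices per value in a dict and folds the minimum 2*(i - prev2) inline.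
import Mathlib
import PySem

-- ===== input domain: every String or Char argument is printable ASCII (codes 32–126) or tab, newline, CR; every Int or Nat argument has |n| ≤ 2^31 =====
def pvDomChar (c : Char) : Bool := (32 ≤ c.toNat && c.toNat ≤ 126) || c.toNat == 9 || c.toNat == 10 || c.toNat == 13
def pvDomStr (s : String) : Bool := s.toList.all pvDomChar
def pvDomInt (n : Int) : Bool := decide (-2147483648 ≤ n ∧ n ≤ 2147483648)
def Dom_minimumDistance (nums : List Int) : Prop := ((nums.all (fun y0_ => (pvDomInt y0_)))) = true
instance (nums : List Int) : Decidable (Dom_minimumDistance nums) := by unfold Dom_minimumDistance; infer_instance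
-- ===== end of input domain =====

-- B replaces A's group-all-indices-then-rescan with a single pass that keeps only the
-- last two indices per value; the return value is identical (objective: alternative).

-- ===== PORT A =====
-- pos[v].append(i) with defaultdict(list)
def aStep (d : PySem.Dict Int (List Int)) (p : Int × Int) : PySem.Dict Int (List Int) :=
  d.modify p.2 [] (fun l => l ++ [p.1])

-- the inner 'for i in range(len(idxs) - 2)' loop; ans = none plays float('inf') (only a sentinel)
def aInner (ans : Option Int) (idxs : List Int) : Option Int :=
  (PySem.List.pyRange 0 ((idxs.length : Int) - 2)).foldl (fun ans i =>
    let a := PySem.List.pyGetD idxs i 0        -- index always in range here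
    let _b := PySem.List.pyGetD idxs (i + 1) 0
    let c := PySem.List.pyGetD idxs (i + 2) 0
    let dist := 2 * (c - a)
    match ans with
    | none => some dist
    | some x => some (min x dist)) ans

def minimumDistance (nums : List Int) : Int :=
  let pos := (PySem.List.enumerate nums).foldl aStep PySem.Dict.empty
  let ans := pos.values.foldl
    (fun ans idxs => if idxs.length < 3 then ans else aInner ans idxs) (none : Option Int)
  match ans with
  | none => -1
  | some x => x

-- ===== PORT B =====
def bStep (st : Option Int × PySem.Dict Int (List Int)) (p : Int × Int) :
    Option Int × PySem.Dict Int (List Int) :=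
  let l := st.2.getD p.2 []
  let ans := if l.length = 2 then
      let d := 2 * (p.1 - PySem.List.pyGetD l 0 0)
      match st.1 with
      | none => some d
      | some x => if d < x then some d else some x
    else st.1
  let t := l ++ [p.1]
  let t := if 2 < t.length then PySem.List.slice t (some 1) none else t
  (ans, st.2.insert p.2 t)

def minimumDistance_alt (nums : List Int) : Int :=
  let st := (PySem.List.enumerate nums).foldl bStep
    ((none : Option Int), (PySem.Dict.empty : PySem.Dict Int (List Int)))
  match st.1 with
  | none => -1
  | some x => x

-- ===== PRECONDITION & SPEC =====
def Spec_minimumDistance (nums : List Int) (out : Int) : Prop := out = minimumDistance_alt nums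
instance (nums : List Int) (out : Int) : Decidable (Spec_minimumDistance nums out) := by unfold Spec_minimumDistance; infer_instance

-- ===== CLAIM (what is proved, stated in full; the proofs are below) =====
def Claim_equal_minimumDistance : Prop := ∀ (nums : List Int), Dom_minimumDistance nums → Spec_minimumDistance nums (minimumDistance nums)

-- ===== LEMMAS AND PROOFS =====

-- min on Option Int, none = +infinity
def omin : Option Int → Option Int → Option Int
  | none, b => b
  | some x, none => some x
  | some x, some y => some (min x y)

theorem omin_none_right (a : Option Int) : omin a none = a := by cases a <;> rfl

theorem omin_assoc (a b c : Option Int) : omin (omin a b) c = omin a (omin b c) := by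
  cases a <;> cases b <;> cases c <;> simp [omin, min_assoc]

theorem omin_comm (a b : Option Int) : omin a b = omin b a := by
  cases a <;> cases b <;> simp [omin, min_comm]

-- the last (at most) two elements of a list
def last2 (l : List Int) : List Int := l.drop (l.length - 2)

-- the candidates 2*(idxs[k+2]-idxs[k]) of A's inner loop
def candList (l : List Int) : List Int :=
  (List.range (l.length - 2)).map (fun k => 2 * (l.getD (k + 2) 0 - l.getD k 0))

def F (l : List Int) : Option Int :=
  (candList l).foldl (fun a x => omin a (some x)) none

-- the single new candidate contributed by appending index i after the kept last-two list
def cand2 : List Int → Int → Option Int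
  | [p2, _], _i => some (2 * (_i - p2))
  | _, _ => none

def omins (os : List (Option Int)) : Option Int := os.foldl omin none

def vmins (ls : List (List Int)) : Option Int := ls.foldl (fun a l => omin a (F l)) none

def Phi (d : PySem.Dict Int (List Int)) : Option Int := vmins d.values

theorem foldl_omin_acc {α : Type} (g : α → Option Int) (ls : List α) (a : Option Int) :
    ls.foldl (fun a x => omin a (g x)) a = omin a (ls.foldl (fun a x => omin a (g x)) none) := by
  induction ls generalizing a with
  | nil => simp [omin_none_right]
  | cons x t ih =>
    simp only [List.foldl_cons]
    rw [ih (omin a (g x)), ih (omin none (g x))]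
    show _ = omin a (omin (g x) _)
    rw [omin_assoc]

theorem omins_cons (o : Option Int) (os : List (Option Int)) :
    omins (o :: os) = omin o (omins os) := by
  show os.foldl omin (omin none o) = _
  have := foldl_omin_acc (fun x => x) os (omin none o)
  simpa [omins] using this

theorem omins_append_singleton (os : List (Option Int)) (o : Option Int) :
    omins (os ++ [o]) = omin (omins os) o := by
  simp only [omins, List.foldl_append, List.foldl_cons, List.foldl_nil]

theorem vmins_eq_omins (ls : List (List Int)) : vmins ls = omins (ls.map F) := by
  simp [vmins, omins, List.foldl_map]

-- F of a short list is "infinity"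
theorem F_short (l : List Int) (h : l.length < 3) : F l = none := by
  have : l.length - 2 = 0 := by omega
  simp [F, candList, this]

theorem last2_short (l : List Int) (h : l.length ≤ 2) : last2 l = l := by
  have : l.length - 2 = 0 := by omega
  simp [last2, this]

theorem length_last2 (l : List Int) : (last2 l).length = min l.length 2 := by
  simp [last2]; omega

theorem last2_two (l : List Int) (h : 2 ≤ l.length) :
    last2 l = [l.getD (l.length - 2) 0, l.getD (l.length - 1) 0] := by
  have h1 : l.length - 2 < l.length := by omega
  have h2 : l.length - 1 < l.length := by omega
  rw [last2, List.drop_eq_getElem_cons h1]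
  have e : l.length - 2 + 1 = l.length - 1 := by omega
  rw [e, List.drop_eq_getElem_cons h2]
  have e2 : l.length - 1 + 1 = l.length := by omega
  rw [e2, List.drop_length]
  simp [List.getD_eq_getElem?_getD, h1, h2]

theorem F_append (l : List Int) (i : Int) :
    F (l ++ [i]) = omin (F l) (cand2 (last2 l) i) := by
  by_cases h : 2 ≤ l.length
  · -- candList (l ++ [i]) = candList l ++ [new candidate]
    have hlen : (l ++ [i]).length - 2 = (l.length - 2) + 1 := by
      simp [List.length_append]; omega
    have hcl : candList (l ++ [i]) = candList l ++ [2 * (i - l.getD (l.length - 2) 0)] := by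
      unfold candList
      rw [hlen, List.range_succ, List.map_append]
      congr 1
      · apply List.map_congr_left
        intro k hk
        have hk' : k < l.length - 2 := List.mem_range.mp hk
        have g1 : (l ++ [i]).getD (k + 2) 0 = l.getD (k + 2) 0 := by
          rw [List.getD_append]; omega
        have g2 : (l ++ [i]).getD k 0 = l.getD k 0 := by
          rw [List.getD_append]; omega
        rw [g1, g2]
      · simp only [List.map_cons, List.map_nil]
        have g1 : (l ++ [i]).getD (l.length - 2 + 2) 0 = i := by
          have e : l.length - 2 + 2 = l.length := by omega
          rw [e, List.getD_append_right l [i] 0 l.length (le_refl _)]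
          simp
        have g2 : (l ++ [i]).getD (l.length - 2) 0 = l.getD (l.length - 2) 0 := by
          rw [List.getD_append]; omega
        simp only [g1, g2]
    rw [last2_two l h]
    show F (l ++ [i]) = omin (F l) (some (2 * (i - l.getD (l.length - 2) 0)))
    unfold F
    rw [hcl, List.foldl_append]
    simp only [List.foldl_cons, List.foldl_nil]
  · -- short list: no new candidate
    have h' : l.length < 2 := by omega
    have hF1 : F (l ++ [i]) = none := by
      apply F_short; simp [List.length_append]; omega
    have hF2 : F l = none := F_short l (by omega)
    have hc : cand2 (last2 l) i = none := by
      rw [last2_short l (by omega)]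
      match l, h' with
      | [], _ => rfl
      | [a], _ => rfl
    rw [hF1, hF2, hc]; rfl

-- A's inner range loop computes omin ans (F idxs)
theorem aInner_eq (ans : Option Int) (l : List Int) : aInner ans l = omin ans (F l) := by
  by_cases h : 2 ≤ l.length
  · have e : ((l.length : Int) - 2) = ((l.length - 2 : Nat) : Int) := by omega
    unfold aInner
    rw [e, PySem.List.pyRange_zero_natCast, List.foldl_map]
    have hbody : ∀ (a : Option Int) (k : Nat), k ∈ List.range (l.length - 2) →
        (fun (ans : Option Int) (i : Int) =>
          let a := PySem.List.pyGetD l i 0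
          let _b := PySem.List.pyGetD l (i + 1) 0
          let c := PySem.List.pyGetD l (i + 2) 0
          let dist := 2 * (c - a)
          match ans with
          | none => some dist
          | some x => some (min x dist)) a ((k : Int))
        = omin a (some (2 * (l.getD (k + 2) 0 - l.getD k 0))) := by
      intro a k _
      have g0 : PySem.List.pyGetD l ((k : Int)) 0 = l.getD k 0 := PySem.List.pyGetD_natCast l k 0
      have g2 : PySem.List.pyGetD l ((k : Int) + 2) 0 = l.getD (k + 2) 0 := by
        have : ((k : Int) + 2) = ((k + 2 : Nat) : Int) := by push_cast; ring
        rw [this, PySem.List.pyGetD_natCast]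
      simp only [g0, g2]
      cases a <;> rfl
    rw [PySem.List.foldl_congr_mem _ _
      (fun a k => omin a (some (2 * (l.getD (k + 2) 0 - l.getD k 0)))) ans hbody]
    have : (List.range (l.length - 2)).foldl
        (fun a k => omin a (some (2 * (l.getD (k + 2) 0 - l.getD k 0)))) ans
        = (candList l).foldl (fun a x => omin a (some x)) ans := by
      simp [candList, List.foldl_map]
    rw [this, foldl_omin_acc]
    rfl
  · have h' : l.length < 2 := by omega
    have hF : F l = none := F_short l (by omega)
    rw [hF, omin_none_right]
    match l, h' with
    | [], _ => rfl
    | [a], _ => rfl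

-- A's per-value body equals the omin/F step
theorem aBody_eq (ans : Option Int) (l : List Int) :
    (if l.length < 3 then ans else aInner ans l) = omin ans (F l) := by
  by_cases h : l.length < 3
  · rw [if_pos h, F_short l h, omin_none_right]
  · rw [if_neg h, aInner_eq]

theorem nodup_keys_modify (d : PySem.Dict Int (List Int)) (v : Int) (f : List Int → List Int)
    (hnd : d.keys.Nodup) : (d.modify v [] f).keys.Nodup := by
  rw [PySem.Dict.keys_modify]
  by_cases hc : d.contains v
  · rw [PySem.Dict.keys_insert_of_contains d _ hc]; exact hnd
  · rw [PySem.Dict.keys_insert_of_not_contains d _ (by simpa using hc)]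
    have hv : v ∉ d.keys := by
      intro hm
      exact hc ((PySem.Dict.contains_iff_mem_keys d v).mpr hm)
    refine List.Nodup.append hnd (List.nodup_singleton v) ?_
    simp only [List.disjoint_singleton]
    exact hv

theorem omins_map_update (ks : List Int) (g : Int → Option Int) (v : Int) (c : Option Int)
    (hnd : ks.Nodup) (hv : v ∈ ks) :
    omins (ks.map (fun k => if k = v then omin (g k) c else g k))
      = omin (omins (ks.map g)) c := by
  induction ks with
  | nil => simp at hv
  | cons k t ih =>
    simp only [List.map_cons]
    rw [omins_cons, omins_cons]
    rcases List.nodup_cons.mp hnd with ⟨hk, hndt⟩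
    by_cases hkv : k = v
    · subst hkv
      have hnot : ∀ w ∈ t, ¬ (w = k) := by
        intro w hw he; exact hk (he ▸ hw)
      have : t.map (fun w => if w = k then omin (g w) c else g w) = t.map g := by
        apply List.map_congr_left
        intro w hw
        rw [if_neg (hnot w hw)]
      rw [if_pos rfl, this]
      rw [omin_assoc, omin_comm c, ← omin_assoc]
    · have hv' : v ∈ t := by
        rcases List.mem_cons.mp hv with h | h
        · exact absurd h.symm hkv
        · exact h
      rw [if_neg hkv, ih hndt hv']
      rw [← omin_assoc]

-- the key step: one defaultdict-append changes Phi by exactly the new candidate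
theorem Phi_modify (d : PySem.Dict Int (List Int)) (hnd : d.keys.Nodup) (v i : Int) :
    Phi (d.modify v [] (fun l => l ++ [i]))
      = omin (Phi d) (cand2 (last2 (d.getD v [])) i) := by
  have hnd' : (d.modify v [] (fun l => l ++ [i])).keys.Nodup := nodup_keys_modify d v _ hnd
  rw [Phi, vmins_eq_omins,
      PySem.Dict.values_eq_map_keys _ hnd' [], List.map_map]
  rw [Phi, vmins_eq_omins, PySem.Dict.values_eq_map_keys d hnd [], List.map_map]
  have hgetD : ∀ k, (d.modify v [] (fun l => l ++ [i])).getD k []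
      = if k = v then d.getD v [] ++ [i] else d.getD k [] := by
    intro k; exact PySem.Dict.getD_modify d v k [] _
  by_cases hc : d.contains v
  · have hkeys : (d.modify v [] (fun l => l ++ [i])).keys = d.keys := by
      rw [PySem.Dict.keys_modify, PySem.Dict.keys_insert_of_contains d _ hc]
    rw [hkeys]
    have hv : v ∈ d.keys := (PySem.Dict.contains_iff_mem_keys d v).mp hc
    have hmap : d.keys.map ((fun l => F l) ∘ fun k => (d.modify v [] (fun l => l ++ [i])).getD k [])
        = d.keys.map (fun k => if k = v then omin (((fun l => F l) ∘ fun k => d.getD k []) k)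
            (cand2 (last2 (d.getD v [])) i) else ((fun l => F l) ∘ fun k => d.getD k []) k) := by
      apply List.map_congr_left
      intro k _
      simp only [Function.comp, hgetD k]
      by_cases hkv : k = v
      · subst hkv
        rw [if_pos rfl, if_pos rfl, F_append]
      · rw [if_neg hkv, if_neg hkv]
    rw [hmap, omins_map_update _ _ _ _ hnd hv]
  · have hkeys : (d.modify v [] (fun l => l ++ [i])).keys = d.keys ++ [v] := by
      rw [PySem.Dict.keys_modify, PySem.Dict.keys_insert_of_not_contains d _ (by simpa using hc)]
    have hgv : d.getD v [] = [] := PySem.Dict.getD_of_not_contains d [] (by simpa using hc)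
    have hcand : cand2 (last2 (d.getD v [])) i = none := by rw [hgv]; rfl
    rw [hkeys, hcand, omin_none_right, List.map_append]
    simp only [List.map_cons, List.map_nil]
    rw [omins_append_singleton]
    have hvnot : v ∉ d.keys := fun hm => hc ((PySem.Dict.contains_iff_mem_keys d v).mpr hm)
    have h1 : d.keys.map ((fun l => F l) ∘ fun k => (d.modify v [] (fun l => l ++ [i])).getD k [])
        = d.keys.map ((fun l => F l) ∘ fun k => d.getD k []) := by
      apply List.map_congr_left
      intro k hk
      have : ¬ (k = v) := fun he => hvnot (he ▸ hk)
      simp only [Function.comp, hgetD k, if_neg this]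
    rw [h1]
    have h2 : ((fun l => F l) ∘ fun k => (d.modify v [] (fun l => l ++ [i])).getD k []) v = none := by
      simp only [Function.comp, hgetD v, if_true, hgv]
      exact F_short _ (by simp)
    rw [h2, omin_none_right]

-- B's ans component of one step
theorem bStep_fst (ans : Option Int) (bd : PySem.Dict Int (List Int)) (p : Int × Int) :
    (bStep (ans, bd) p).1 = omin ans (cand2 (bd.getD p.2 []) p.1) := by
  unfold bStep
  match hl : bd.getD p.2 [] with
  | [] => simp [cand2, omin_none_right]
  | [x] => simp [cand2, omin_none_right]
  | [x, y] =>
    have hx : PySem.List.pyGetD [x, y] 0 0 = x := rfl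
    simp only [hx, List.length_cons, List.length_nil, Nat.reduceAdd, if_true]
    cases ans with
    | none => rfl
    | some a =>
      show (if 2 * (p.1 - x) < a then some (2 * (p.1 - x)) else some a)
          = some (min a (2 * (p.1 - x)))
      split_ifs with h
      · rw [min_eq_right (by omega)]
      · rw [min_eq_left (by omega)]
  | x :: y :: z :: t =>
    simp only [List.length_cons]
    rw [if_neg (by omega)]
    simp [cand2, omin_none_right]

-- B's dict component of one step, under the invariant that the stored list is last2 of something
theorem bStep_snd (ans : Option Int) (bd : PySem.Dict Int (List Int)) (p : Int × Int)
    (m : List Int) (hm : bd.getD p.2 [] = last2 m) :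
    (bStep (ans, bd) p).2 = bd.insert p.2 (last2 (m ++ [p.1])) := by
  unfold bStep
  simp only [hm]
  congr 1
  have hlen : (last2 m).length = min m.length 2 := length_last2 m
  by_cases h : 2 ≤ m.length
  · have hl2 : (last2 m).length = 2 := by omega
    have hif : 2 < (last2 m ++ [p.1]).length := by
      simp only [List.length_append, List.length_cons, List.length_nil, hl2]
      omega
    rw [if_pos hif, PySem.List.slice_from _ (by norm_num)]
    -- drop 1 of (last2 m ++ [i]) = last2 (m ++ [i])
    show List.drop 1 (last2 m ++ [p.1]) = last2 (m ++ [p.1])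
    rw [last2, last2, List.length_append]
    simp only [List.length_cons, List.length_nil, Nat.zero_add]
    have e1 : List.drop 1 (List.drop (m.length - 2) m ++ [p.1])
        = List.drop 1 (List.drop (m.length - 2) m) ++ [p.1] :=
      List.drop_append_of_le_length (by simp only [List.length_drop]; omega)
    have e2 : List.drop (m.length + 1 - 2) (m ++ [p.1])
        = List.drop (m.length + 1 - 2) m ++ [p.1] :=
      List.drop_append_of_le_length (by omega)
    rw [e1, e2, List.drop_drop]
    congr 2
    omega
  · have h' : m.length < 2 := by omega
    have hm2 : last2 m = m := last2_short m (by omega)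
    rw [hm2]
    have hif : ¬ (2 < (m ++ [p.1]).length) := by simp only [List.length_append, List.length_cons, List.length_nil]; omega
    rw [if_neg hif]
    rw [last2, List.length_append]
    have : m.length + 1 - 2 = 0 := by omega
    simp [this]

-- the loop invariant: B's running answer is Phi of A's dict built from the same prefix
theorem loop_inv (ps : List (Int × Int)) (ans : Option Int)
    (bd ad : PySem.Dict Int (List Int))
    (hnd : ad.keys.Nodup)
    (hbd : ∀ v, bd.getD v [] = last2 (ad.getD v []))
    (hans : ans = Phi ad) :
    (ps.foldl bStep (ans, bd)).1 = Phi (ps.foldl aStep ad) := by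
  induction ps generalizing ans bd ad with
  | nil => simpa using hans
  | cons p t ih =>
    simp only [List.foldl_cons]
    have hstep : bStep (ans, bd) p
        = ((bStep (ans, bd) p).1, bd.insert p.2 (last2 (ad.getD p.2 [] ++ [p.1]))) := by
      rw [← bStep_snd ans bd p (ad.getD p.2 []) (hbd p.2)]
    rw [hstep]
    apply ih
    · exact nodup_keys_modify ad p.2 _ hnd
    · intro v
      rw [PySem.Dict.getD_insert]
      have := PySem.Dict.getD_modify ad p.2 v [] (fun l => l ++ [p.1])
      rw [aStep, this]
      by_cases hv : v = p.2
      · simp only [if_pos hv]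
      · rw [if_neg hv, if_neg hv, hbd v]
    · rw [bStep_fst, hbd p.2, hans, aStep, Phi_modify ad hnd p.2 p.1]

-- ===== VERDICT (by name: the statement is the Claim_ definition above) =====
theorem minimumDistance_spec : Claim_equal_minimumDistance := by
  intro nums _
  unfold Spec_minimumDistance minimumDistance minimumDistance_alt
  have hA : ((PySem.List.enumerate nums).foldl aStep PySem.Dict.empty).values.foldl
      (fun ans idxs => if idxs.length < 3 then ans else aInner ans idxs) (none : Option Int)
      = Phi ((PySem.List.enumerate nums).foldl aStep PySem.Dict.empty) := by
    rw [Phi, vmins]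
    apply PySem.List.foldl_congr_mem
    intro acc x _
    exact aBody_eq acc x
  have hB : ((PySem.List.enumerate nums).foldl bStep
      ((none : Option Int), (PySem.Dict.empty : PySem.Dict Int (List Int)))).1
      = Phi ((PySem.List.enumerate nums).foldl aStep PySem.Dict.empty) := by
    apply loop_inv
    · exact PySem.Dict.nodup_keys_empty
    · intro v
      rfl
    · rfl
  simp only [hA, hB]
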